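-- pv_equiv track=rewrite | github.com/adith-p/A2Z_striver_dsa | 3-arrays/easy/3.9merge_2arry.py | sortedArray
-- ===== SOURCE A (Python) =====
-- def sortedArray(a: list[int], b: list[int]) -> list[int]:
--
--     result = []
--
--     for i in a:
--         if i not in result:
--             result.append(i)
--
--     for i in b:
--         if i not in result:
--             result.append(i)
--
--     result.sort()
--     return result
-- ===== SOURCE B (Python) =====
-- def sortedArray(a: list[int], b: list[int]) -> list[int]:
--     merged = sorted(a + b)
--     result = []
--     for x in merged:
--         if not result or result[-1] != x:
--             result.append(x)
--     return result
-- ===== Notes on version B (the rewrite author's own statement) =====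
-- stated objective: faster
-- what changed: A dedups with a quadratic membership scan before sorting; B sorts the concatenation once, then removes duplicates in one linear pass by comparing each element with the last appended one.
import Mathlib
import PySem

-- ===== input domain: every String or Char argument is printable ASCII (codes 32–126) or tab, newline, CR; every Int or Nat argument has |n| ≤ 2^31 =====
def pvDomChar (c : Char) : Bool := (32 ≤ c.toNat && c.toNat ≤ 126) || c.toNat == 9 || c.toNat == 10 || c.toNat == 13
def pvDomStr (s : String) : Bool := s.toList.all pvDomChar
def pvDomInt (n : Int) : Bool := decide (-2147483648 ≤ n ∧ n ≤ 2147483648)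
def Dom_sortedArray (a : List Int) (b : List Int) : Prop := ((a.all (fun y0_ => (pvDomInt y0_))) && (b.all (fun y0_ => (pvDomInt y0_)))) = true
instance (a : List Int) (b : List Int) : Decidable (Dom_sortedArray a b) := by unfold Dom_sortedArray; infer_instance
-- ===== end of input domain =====

-- B sorts the concatenation once and removes duplicates in a single adjacent-comparison pass,
-- replacing A's quadratic membership-scan dedup followed by a sort.


-- ===== PORT A =====
-- result = []; for i in a: if i not in result: result.append(i); same for b; result.sort()
def sortedArray (a : List Int) (b : List Int) : List Int :=
  let r1 := a.foldl (fun acc i => if i ∈ acc then acc else acc ++ [i]) []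
  let r2 := b.foldl (fun acc i => if i ∈ acc then acc else acc ++ [i]) r1
  PySem.List.sorted r2 (fun x => x) false

-- ===== PORT B =====
-- merged = sorted(a + b); for x in merged: if not result or result[-1] != x: result.append(x)
-- ('not result or result[-1] != x' is exactly 'acc.getLast? ≠ some x': none when empty, last element otherwise)
def sortedArray_alt (a : List Int) (b : List Int) : List Int :=
  let merged := PySem.List.sorted (a ++ b) (fun x => x) false
  merged.foldl (fun acc x => if acc.getLast? ≠ some x then acc ++ [x] else acc) []

-- ===== PRECONDITION & SPEC =====
def Spec_sortedArray (a : List Int) (b : List Int) (out : List Int) : Prop := out = sortedArray_alt a b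
instance (a : List Int) (b : List Int) (out : List Int) : Decidable (Spec_sortedArray a b out) := by unfold Spec_sortedArray; infer_instance

-- ===== CLAIM (what is proved, stated in full; the proofs are below) =====
def Claim_equal_sortedArray : Prop := ∀ (a : List Int) (b : List Int), Dom_sortedArray a b → Spec_sortedArray a b (sortedArray a b)

-- ===== LEMMAS AND PROOFS =====

-- recursive form of B's adjacent-dedup loop, for elements after a last-appended value p
def pvAdj : Int → List Int → List Int
  | _, [] => []
  | p, x :: xs => if x = p then pvAdj p xs else x :: pvAdj x xs

theorem pvAdjLoop_eq (l acc : List Int) (p : Int) (h : acc.getLast? = some p) :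
    l.foldl (fun acc x => if acc.getLast? ≠ some x then acc ++ [x] else acc) acc
      = acc ++ pvAdj p l := by
  induction l generalizing acc p with
  | nil => simp [pvAdj]
  | cons x xs ih =>
    by_cases hx : x = p
    · subst hx
      simp only [List.foldl_cons, h, pvAdj, if_pos rfl]
      simpa using ih acc x h
    · have hstep : (if acc.getLast? ≠ some x then acc ++ [x] else acc) = acc ++ [x] := by
        rw [if_pos]; rw [h]; simpa using fun e => hx e.symm
      simp only [List.foldl_cons, hstep]
      rw [ih (acc ++ [x]) x (by simp)]
      simp [pvAdj, hx]

theorem pvAdj_spec (l : List Int) (p : Int) (h : (p :: l).Pairwise (· ≤ ·)) :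
    (p :: pvAdj p l).Pairwise (· < ·) ∧ ∀ y, (y ∈ p :: pvAdj p l ↔ y ∈ p :: l) := by
  induction l generalizing p with
  | nil => simp [pvAdj]
  | cons x xs ih =>
    rcases List.pairwise_cons.mp h with ⟨hple, hxxs⟩
    by_cases hx : x = p
    · subst hx
      obtain ⟨hp, hm⟩ := ih x hxxs
      have hadj : pvAdj x (x :: xs) = pvAdj x xs := by simp [pvAdj]
      rw [hadj]
      refine ⟨hp, fun y => ?_⟩
      rw [hm y]
      simp only [List.mem_cons]
      tauto
    · obtain ⟨hp, hm⟩ := ih x hxxs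
      have hplt : p < x := lt_of_le_of_ne (hple x (List.mem_cons_self ..)) (fun e => hx e.symm)
      constructor
      · simp only [pvAdj, if_neg hx]
        refine List.pairwise_cons.mpr ⟨?_, hp⟩
        intro y hy
        rcases List.mem_cons.mp ((hm y).mp hy) with h1 | h1
        · exact h1 ▸ hplt
        · exact lt_of_lt_of_le hplt (List.rel_of_pairwise_cons hxxs h1)
      · intro y
        simp only [pvAdj, if_neg hx]
        have := hm y
        constructor
        · intro hy; rcases List.mem_cons.mp hy with h1 | h1
          · simp [h1]
          · rcases List.mem_cons.mp (this.mp h1) with h2 | h2 <;> simp [h2]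
        · intro hy; rcases List.mem_cons.mp hy with h1 | h1
          · simp [h1]
          · exact List.mem_cons_of_mem _ (this.mpr h1)

theorem pvDedup_spec (l acc : List Int) (h : acc.Nodup) :
    (l.foldl (fun acc i => if i ∈ acc then acc else acc ++ [i]) acc).Nodup ∧
      ∀ y, (y ∈ l.foldl (fun acc i => if i ∈ acc then acc else acc ++ [i]) acc ↔ y ∈ acc ∨ y ∈ l) := by
  induction l generalizing acc with
  | nil => simpa using h
  | cons x xs ih =>
    by_cases hx : x ∈ acc
    · simp only [List.foldl_cons, if_pos hx]
      obtain ⟨h1, h2⟩ := ih acc h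
      refine ⟨h1, fun y => ?_⟩
      rw [h2 y]
      constructor
      · rintro (h3 | h3) <;> simp [h3]
      · rintro (h3 | h3)
        · exact Or.inl h3
        · rcases List.mem_cons.mp h3 with h4 | h4
          · exact Or.inl (h4 ▸ hx)
          · exact Or.inr h4
    · simp only [List.foldl_cons, if_neg hx]
      obtain ⟨h1, h2⟩ := ih (acc ++ [x]) (by simp [List.nodup_append, h]; exact fun a ha e => hx (e ▸ ha))
      refine ⟨h1, fun y => ?_⟩
      rw [h2 y]
      simp only [List.mem_append, List.mem_singleton, List.mem_cons]
      tauto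

theorem sortedArray_eq_alt (a b : List Int) : sortedArray a b = sortedArray_alt a b := by
  unfold sortedArray sortedArray_alt
  dsimp only
  rw [← List.foldl_append]
  set D := (a ++ b).foldl (fun acc i => if i ∈ acc then acc else acc ++ [i]) [] with hD
  obtain ⟨hDnd, hDmem⟩ := pvDedup_spec (a ++ b) [] (List.nodup_nil)
  rcases hM : PySem.List.sorted (a ++ b) (fun x => x) false with _ | ⟨m, t⟩
  · have hab : a ++ b = [] := (PySem.List.sorted_eq_nil_iff (a ++ b) (fun x => x) false).mp hM
    rw [hab] at hD
    simp [hD, hab]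
    rfl
  · have hpw : (m :: t).Pairwise (fun x y => x ≤ y) := by
      have := PySem.List.sorted_pairwise (xs := a ++ b) (key := fun x : Int => x)
      rw [hM] at this; exact this
    obtain ⟨hlt, hmem⟩ := pvAdj_spec t m hpw
    have hBout : (m :: t).foldl (fun acc x => if acc.getLast? ≠ some x then acc ++ [x] else acc) []
        = m :: pvAdj m t := by
      have hstep : (if ([] : List Int).getLast? ≠ some m then ([] : List Int) ++ [m] else []) = [m] := by
        simp
      rw [List.foldl_cons, hstep, pvAdjLoop_eq t [m] m (by simp)]
      simp
    rw [hBout]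
    have hnd : (m :: pvAdj m t).Nodup := hlt.imp (fun h => ne_of_lt h)
    have hperm : (m :: pvAdj m t).Perm D := by
      rw [List.perm_ext_iff_of_nodup hnd hDnd]
      intro y
      rw [hmem y, hDmem y]
      have : y ∈ m :: t ↔ y ∈ a ++ b := by
        rw [← hM]; exact PySem.List.mem_sorted (a ++ b) (fun x => x) false y
      simp [this]
    exact PySem.List.sorted_eq_of_perm_of_pairwise_lt D (m :: pvAdj m t) (fun x => x) hperm hlt

-- ===== VERDICT (by name: the statement is the Claim_ definition above) =====
theorem sortedArray_spec : Claim_equal_sortedArray := by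
  intro a b _
  unfold Spec_sortedArray
  exact sortedArray_eq_alt a b
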